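-- pv_equiv track=rewrite | github.com/ipeterov/random-stuff | биржевая программа/Подбор рычага/main.py | getlever
-- ===== SOURCE A (Python) =====
-- def getlever(money, reliability):
--     """
--         money - массив значений количества денег (в рублях) на множество моментов времени
--         Желаемая надёжность (reliability) измеряется в вероятности проигрыша за 1 сделку
--     """
--     jumps = {}
--     for i in range(len(money)-1):
--         val = abs(round(money[i+1] - money[i], 0))
--         if val == 0:
--             continue
--         if val in jumps:
--             jumps[val] += 1
--         else:
--             jumps[val] = 1
--
--     jumps = list(jumps.items())
--     jumps.sort(key = lambda x: x[0])
--
--     return jumps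
-- ===== SOURCE B (Python) =====
-- def getlever(money, reliability):
--     vals = sorted(v for v in (abs(round(b - a, 0)) for a, b in zip(money, money[1:])) if v != 0)
--     out = []
--     i = 0
--     n = len(vals)
--     while i < n:
--         j = i + 1
--         while j < n and vals[j] == vals[i]:
--             j += 1
--         out.append((vals[i], j - i))
--         i = j
--     return out
-- ===== Notes on version B (the rewrite author's own statement) =====
-- stated objective: alternative
-- what changed: B collects the non-zero absolute consecutive differences, sorts that raw value list once, and emits (value, run length) pairs by a run-length walk over the sorted list, instead of A's dict of counts accumulated per index and sorted by key afterwards.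
import Mathlib
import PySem

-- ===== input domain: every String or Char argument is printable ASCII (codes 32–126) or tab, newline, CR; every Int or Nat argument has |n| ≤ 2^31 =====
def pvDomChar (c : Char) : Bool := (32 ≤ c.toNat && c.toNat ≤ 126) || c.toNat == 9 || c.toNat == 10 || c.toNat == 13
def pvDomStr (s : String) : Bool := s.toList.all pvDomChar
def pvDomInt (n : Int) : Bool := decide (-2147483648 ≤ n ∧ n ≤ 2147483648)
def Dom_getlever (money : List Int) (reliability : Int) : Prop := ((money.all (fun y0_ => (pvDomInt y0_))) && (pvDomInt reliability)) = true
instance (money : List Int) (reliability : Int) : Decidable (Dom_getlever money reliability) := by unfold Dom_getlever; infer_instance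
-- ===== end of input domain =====

-- B sorts the raw non-zero jumps once and counts them by a run-length walk over the sorted list,
-- instead of A's per-index dict of counts sorted afterwards (objective: alternative; same return value).

-- ===== PORT A =====
-- abs(round(money[i+1]-money[i], 0)) on ints is |money[i+1]-money[i]|; the indices i, i+1 are
-- always in range for i in range(len(money)-1), so pyGetD with default 0 is exact here.
def getlever (money : List Int) (reliability : Int) : List (Int × Int) :=
  let jumps : PySem.Dict Int Int :=
    (PySem.List.pyRange 0 ((money.length : Int) - 1) 1).foldl
      (fun (jumps : PySem.Dict Int Int) i =>
        let val := |PySem.List.pyGetD money (i + 1) 0 - PySem.List.pyGetD money i 0|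
        if val = 0 then jumps
        else match jumps.get? val with
          | some n => jumps.insert val (n + 1)
          | none => jumps.insert val 1)
      PySem.Dict.empty
  PySem.List.sorted jumps.items (fun x => x.1) false

-- ===== PORT B =====
-- the outer while loop of Source B, one step per run of equal values; the inner
-- `while j < n and vals[j] == vals[i]` scan is the takeWhile prefix, and `i = j` drops it.
def pvRuns : List Int → List (Int × Int)
  | [] => []
  | v :: rest =>
      let run := rest.takeWhile (fun x => x == v)
      (v, (run.length : Int) + 1) :: pvRuns (rest.drop run.length)
termination_by s => s.length
decreasing_by
  have := (List.takeWhile_sublist (l := rest) (p := fun x => x == v)).length_le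
  simp only [List.length_drop, List.length_cons]
  omega

def getlever_alt (money : List Int) (reliability : Int) : List (Int × Int) :=
  let vals := PySem.List.sorted
      (((money.zip (PySem.List.slice money (some 1) none)).map (fun p => |p.2 - p.1|)).filter
        (fun v => !(v == 0)))
      (fun v => v) false
  pvRuns vals

-- ===== PRECONDITION & SPEC =====
def Spec_getlever (money : List Int) (reliability : Int) (out : List (Int × Int)) : Prop := out = getlever_alt money reliability
instance (money : List Int) (reliability : Int) (out : List (Int × Int)) : Decidable (Spec_getlever money reliability out) := by unfold Spec_getlever; infer_instance

-- ===== CLAIM (what is proved, stated in full; the proofs are below) =====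
def Claim_equal_getlever : Prop := ∀ (money : List Int) (reliability : Int), Dom_getlever money reliability → Spec_getlever money reliability (getlever money reliability)

-- ===== LEMMAS AND PROOFS =====

-- the list of non-zero absolute consecutive differences: the common backbone of both ports
def pvDiffs (money : List Int) : List Int :=
  ((money.zip (money.drop 1)).map (fun p => |p.2 - p.1|)).filter (fun v => !(v == 0))

-- A's per-index jump values, read off the range loop, are the consecutive differences
theorem pv_map_range_eq (money : List Int) :
    (PySem.List.pyRange 0 ((money.length : Int) - 1) 1).map
        (fun i => |PySem.List.pyGetD money (i + 1) 0 - PySem.List.pyGetD money i 0|)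
      = (money.zip (money.drop 1)).map (fun p => |p.2 - p.1|) := by
  apply List.ext_getElem
  · simp [PySem.List.length_pyRange_one]
  · intro k h1 h2
    have hk : k < money.length - 1 := by
      simp [PySem.List.length_pyRange_one] at h1; omega
    simp only [List.getElem_map, PySem.List.getElem_pyRange_one, List.getElem_zip,
      List.getElem_drop]
    have e1 : (0 : Int) + k + 1 = ((k + 1 : Nat) : Int) := by omega
    have e0 : (0 : Int) + k = ((k : Nat) : Int) := by omega
    rw [e1, e0, PySem.List.pyGetD_natCast, PySem.List.pyGetD_natCast]
    have hgk : money.getD k 0 = money[k]'(by omega) := List.getD_eq_getElem money 0 (by omega)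
    have hgk1 : money.getD (k+1) 0 = money[k+1]'(by omega) := List.getD_eq_getElem money 0 (by omega)
    rw [hgk, hgk1]
    have hc : 1 + k = k + 1 := by omega
    simp [hc]

-- the `if val == 0: continue` guard is a filter of the folded list
theorem pv_foldl_filter (l : List Int) (step : PySem.Dict Int Int → Int → PySem.Dict Int Int)
    (d : PySem.Dict Int Int) :
    l.foldl (fun d v => if v = 0 then d else step d v) d
      = (l.filter (fun v => !(v == 0))).foldl step d := by
  induction l generalizing d with
  | nil => rfl
  | cons x xs ih =>
    by_cases hx : x = 0 <;> simp [hx, ih]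

-- A is the counter of the non-zero differences, sorted by key
theorem pv_getlever_eq_counter (money : List Int) (reliability : Int) :
    getlever money reliability
      = PySem.List.sorted (PySem.Dict.counter (pvDiffs money)).items (fun x => x.1) false := by
  unfold getlever
  have hstep : (fun (d : PySem.Dict Int Int) (v : Int) =>
      match d.get? v with
      | some n => d.insert v (n + 1)
      | none => d.insert v 1)
      = fun d v => d.insert v (d.getD v 0 + 1) := by
    funext d v
    cases h : d.get? v <;> simp [PySem.Dict.getD_eq_get?_getD, h]
  show PySem.List.sorted
      (((PySem.List.pyRange 0 ((money.length : Int) - 1) 1).foldl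
        (fun (d : PySem.Dict Int Int) i =>
          (fun (d : PySem.Dict Int Int) (val : Int) =>
            if val = 0 then d
            else match d.get? val with
              | some n => d.insert val (n + 1)
              | none => d.insert val 1) d
            (|PySem.List.pyGetD money (i + 1) 0 - PySem.List.pyGetD money i 0|))
        PySem.Dict.empty)).items (fun x => x.1) false = _
  have hfm := List.foldl_map
    (f := fun i => |PySem.List.pyGetD money (i + 1) 0 - PySem.List.pyGetD money i 0|)
    (g := fun (d : PySem.Dict Int Int) (val : Int) =>
      if val = 0 then d
      else match d.get? val with
        | some n => d.insert val (n + 1)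
        | none => d.insert val 1)
    (l := PySem.List.pyRange 0 ((money.length : Int) - 1) 1) (init := PySem.Dict.empty)
  rw [← hfm, pv_map_range_eq, pv_foldl_filter]
  simp only [hstep, PySem.Dict.foldl_insert_getD_add_one_eq_counter]
  rfl

-- dropping the equal-prefix length is dropWhile
theorem pv_drop_run (v : Int) (rest : List Int) :
    rest.drop (rest.takeWhile (fun x => x == v)).length = rest.dropWhile (fun x => x == v) := by
  have h := List.takeWhile_append_dropWhile (p := fun x => x == v) (l := rest)
  set A := rest.takeWhile (fun x => x == v) with hA
  set B := rest.dropWhile (fun x => x == v) with hB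
  rw [← h, List.drop_left]

-- in a sorted list, everything after the run of the head is strictly larger
theorem pv_gt_of_mem_drop (v : Int) (rest : List Int)
    (h : (v :: rest).Pairwise (· ≤ ·)) :
    ∀ x ∈ rest.dropWhile (fun x => x == v), v < x := by
  intro x hx
  have hle : v ≤ x := (List.pairwise_cons.mp h).1 x ((List.dropWhile_sublist _).subset hx)
  rcases e : rest.dropWhile (fun x => x == v) with _ | ⟨h0, t'⟩
  · simp [e] at hx
  · have hh0 : ¬ (h0 == v) = true := by
      have := List.head_dropWhile_not (p := fun x => x == v) (l := rest) (by simp [e])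
      simpa [e] using this
    have hh0v : v < h0 := by
      have : v ≤ h0 := (List.pairwise_cons.mp h).1 h0 (by
        have : h0 ∈ rest.dropWhile (fun x => x == v) := by simp [e]
        exact (List.dropWhile_sublist _).subset this)
      have : h0 ≠ v := by simpa using hh0
      omega
    rw [e] at hx
    rcases List.mem_cons.mp hx with rfl | hx'
    · exact hh0v
    · have hpt : (rest.dropWhile (fun x => x == v)).Pairwise (· ≤ ·) :=
        (List.pairwise_cons.mp h).2.sublist (List.dropWhile_sublist _)
      rw [e] at hpt
      have : h0 ≤ x := (List.pairwise_cons.mp hpt).1 x hx'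
      omega

theorem pv_run_all (v : Int) (rest : List Int) :
    ∀ x ∈ rest.takeWhile (fun x => x == v), x = v := by
  intro x hx
  simpa using List.mem_takeWhile_imp hx

-- membership in the run-length output of a sorted list: value present, count exact
theorem pv_runs_mem (s : List Int) (h : s.Pairwise (· ≤ ·)) (k c : Int) :
    (k, c) ∈ pvRuns s ↔ k ∈ s ∧ c = (s.count k : Int) := by
  induction s using pvRuns.induct with
  | case1 => simp [pvRuns]
  | case2 v rest run ih =>
    have hpt : (rest.drop run.length).Pairwise (· ≤ ·) :=
      (List.pairwise_cons.mp h).2.sublist (List.drop_sublist _ _)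
    have hgt : ∀ x ∈ rest.drop run.length, v < x := by
      rw [pv_drop_run]; exact pv_gt_of_mem_drop v rest h
    have hrun : ∀ x ∈ run, x = v := pv_run_all v rest
    have hsplit : run ++ rest.drop run.length = rest := by
      rw [pv_drop_run]; exact List.takeWhile_append_dropWhile
    have hcr : rest.count k = run.count k + (rest.drop run.length).count k := by
      conv_lhs => rw [← hsplit]
      rw [List.count_append]
    rw [show pvRuns (v :: rest) = (v, (run.length : Int) + 1) :: pvRuns (rest.drop run.length) by
      simp [pvRuns]; exact ⟨rfl, rfl⟩]
    by_cases hk : k = v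
    · subst hk
      have hnt : k ∉ rest.drop run.length := fun hm => absurd (hgt k hm) (lt_irrefl k)
      have hcrun : run.count k = run.length := List.count_eq_length.mpr (fun b hb => (hrun b hb).symm)
      have hct : (rest.drop run.length).count k = 0 := List.count_eq_zero.mpr hnt
      simp only [List.mem_cons, ih hpt, List.count_cons_self]
      have hcrest : rest.count k = run.length := by rw [hcr, hcrun, hct]; omega
      constructor
      · rintro (he | ⟨hm, _⟩)
        · have hcv : c = (run.length : Int) + 1 := ((Prod.mk.injEq _ _ _ _).mp he).2
          exact ⟨by simp, by omega⟩
        · exact absurd hm hnt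
      · rintro ⟨_, hc⟩
        left
        have : c = (run.length : Int) + 1 := by omega
        rw [this]
    · have hkr : k ∉ run := fun hm => hk (hrun k hm)
      have hcrun : run.count k = 0 := List.count_eq_zero.mpr hkr
      have hmem : k ∈ rest ↔ k ∈ rest.drop run.length := by
        rw [← hsplit]
        simp [List.mem_append, hkr]
      simp only [List.mem_cons, ih hpt, List.count_cons, hcr, hcrun]
      constructor
      · rintro (he | ⟨hm, hc⟩)
        · exact absurd ((Prod.mk.injEq _ _ _ _).mp he).1 hk
        · exact ⟨Or.inr (hmem.mpr hm), by simp [hc, Ne.symm hk]⟩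
      · rintro ⟨hm | hm, hc⟩
        · exact absurd hm hk
        · exact Or.inr ⟨hmem.mp hm, by simp [hc, Ne.symm hk]⟩

-- the run-length output of a sorted list has strictly increasing keys
theorem pv_runs_pairwise (s : List Int) (h : s.Pairwise (· ≤ ·)) :
    (pvRuns s).Pairwise (fun a b => a.1 < b.1) := by
  induction s using pvRuns.induct with
  | case1 => simp [pvRuns]
  | case2 v rest run ih =>
    have hpt : (rest.drop run.length).Pairwise (· ≤ ·) :=
      (List.pairwise_cons.mp h).2.sublist (List.drop_sublist _ _)
    have hgt : ∀ x ∈ rest.drop run.length, v < x := by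
      rw [pv_drop_run]; exact pv_gt_of_mem_drop v rest h
    rw [show pvRuns (v :: rest) = (v, (run.length : Int) + 1) :: pvRuns (rest.drop run.length) by
      simp [pvRuns]; exact ⟨rfl, rfl⟩]
    refine List.pairwise_cons.mpr ⟨?_, ih hpt⟩
    rintro ⟨k, c⟩ hm
    exact hgt k ((pv_runs_mem _ hpt k c).mp hm).1

-- the counter's items sorted by key ARE the run-length encoding of the sorted value list
theorem pv_main (l : List Int) :
    PySem.List.sorted (PySem.Dict.counter l).items (fun x => x.1) false
      = pvRuns (PySem.List.sorted l (fun v => v) false) := by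
  set s := PySem.List.sorted l (fun v => v) false with hs
  have hsp : s.Pairwise (· ≤ ·) := by
    have := PySem.List.sorted_pairwise (xs := l) (key := fun v => v)
    simpa using this
  have hperm : s.Perm l := PySem.List.sorted_perm l (fun v => v) false
  have hpw : (pvRuns s).Pairwise (fun a b => a.1 < b.1) := pv_runs_pairwise s hsp
  have hnd1 : (pvRuns s).Nodup := hpw.imp (fun hab => by
    intro he; rw [he] at hab; exact lt_irrefl _ hab)
  have hnd2 : (PySem.Dict.counter l (κ := Int)).items.Nodup := by
    have hk := PySem.Dict.nodup_keys_counter (xs := l)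
    exact hk.of_map
  apply PySem.List.sorted_eq_of_perm_of_pairwise_lt
  · apply (List.perm_ext_iff_of_nodup hnd1 hnd2).mpr
    rintro ⟨k, c⟩
    rw [pv_runs_mem s hsp k c, PySem.Dict.items_counter]
    constructor
    · rintro ⟨hm, hc⟩
      refine List.mem_map.mpr ⟨k, ?_, ?_⟩
      · exact (PySem.Set.mem_ofList _ _).mpr (hperm.subset hm)
      · rw [hc, hperm.count_eq]
    · intro hm
      rcases List.mem_map.mp hm with ⟨k', hk', he⟩
      have : k' = k ∧ ((l.count k' : Int)) = c := by
        constructor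
        · exact congrArg Prod.fst he
        · exact congrArg Prod.snd he
      rcases this with ⟨rfl, hc⟩
      refine ⟨hperm.symm.subset ((PySem.Set.mem_ofList _ _).mp hk'), ?_⟩
      rw [hperm.count_eq, hc]
  · exact hpw

-- ===== VERDICT (by name: the statement is the Claim_ definition above) =====
theorem getlever_spec : Claim_equal_getlever := by
  intro money reliability _
  unfold Spec_getlever getlever_alt
  rw [pv_getlever_eq_counter money reliability, pv_main]
  have hslice : PySem.List.slice money (some 1) none = money.drop 1 := by simp [pysem]
  rw [hslice]
  rfl
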